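-- pv_equiv track=rewrite | github.com/kooroshkz/Algorithms-and-Data-Structures | Submissions/get_permission/exercise11_3893995.py | flashlight_problem
-- ===== SOURCE A (Python) =====
-- def flashlight_problem(crossing_time):
--     """
--     This function solves the flashlight problem and calculates the total time it takes to cross the bridge.
--
--     :param crossing_time: A list of the time it takes each person to cross the bridge.
--     :type crossing_time: list[int]
--     :return: The total time it takes for the group to cross the bridge
--     :rtype: int
--     """
--
--     crossing_time.sort()
--     total_time = 0
--
--     while len(crossing_time) > 3:
--         # Two fastest cross, first fastest returns, two slowest cross, second fastest returns
--         total_time += crossing_time[1] * 2 + crossing_time[0] + crossing_time[-1]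
--         crossing_time = crossing_time[:-2]  # remove two slowest
--
--     if len(crossing_time) == 3:
--         total_time += crossing_time[0] + crossing_time[1] + crossing_time[2]
--     elif len(crossing_time) == 2:
--         total_time += crossing_time[1]
--     else:  # len(crossing_time) == 1
--         total_time += crossing_time[0]
--
--     return total_time
-- ===== SOURCE B (Python) =====
-- def flashlight_problem(crossing_time):
--     """Same result as A; sorts the argument in place like A, then computes the
--     total by a closed-form sum over indices instead of repeatedly slicing."""
--     crossing_time.sort()
--     t = crossing_time
--     n = len(t)
--     if n <= 2:
--         return t[-1]
--     if n == 3: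
--         return t[0] + t[1] + t[2]
--     k = (n - 2) // 2
--     total = k * (t[0] + 2 * t[1]) + sum(t[n - 1 - 2 * i] for i in range(k))
--     if n % 2 == 0:
--         return total + t[1]
--     return total + t[0] + t[1] + t[2]
-- ===== Notes on version B (the rewrite author's own statement) =====
-- stated objective: faster
-- what changed: A repeatedly slices off the two slowest people in a while loop (copying the list each iteration); B sorts once and computes the answer in closed form: k iterations contribute k*(t[0]+2*t[1]) plus a direct sum of every other element from the top, then a parity-determined finish.
import Mathlib
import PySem

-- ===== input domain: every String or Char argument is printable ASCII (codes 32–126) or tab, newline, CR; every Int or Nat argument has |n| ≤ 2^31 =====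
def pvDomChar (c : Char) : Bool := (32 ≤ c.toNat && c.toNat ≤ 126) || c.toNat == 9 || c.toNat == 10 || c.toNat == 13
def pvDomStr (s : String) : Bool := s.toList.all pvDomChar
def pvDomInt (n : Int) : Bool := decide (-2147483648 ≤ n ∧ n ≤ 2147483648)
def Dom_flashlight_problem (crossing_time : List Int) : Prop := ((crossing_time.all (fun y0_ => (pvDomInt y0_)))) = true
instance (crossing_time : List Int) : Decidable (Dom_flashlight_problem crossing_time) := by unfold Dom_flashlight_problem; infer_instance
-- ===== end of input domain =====

-- B replaces A's quadratic slice-and-repeat loop by one closed-form sum over indices after a single sort.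
-- Both Pythons sort the argument in place; the equivalence proved here is about the RETURN value.

-- ===== PORT A =====
-- A's while loop: each iteration adds t[1]*2 + t[0] + t[-1] and drops the two slowest (ct[:-2]);
-- the loop's base case carries A's trailing if/elif/else chain.
def pvLoopA (ct : List Int) (total : Int) : Int :=
  if h : ct.length > 3 then
    pvLoopA (PySem.List.slice ct none (some (-2)))
      (total + PySem.List.pyGetD ct 1 0 * 2 + PySem.List.pyGetD ct 0 0 + PySem.List.pyGetD ct (-1) 0)
  else if ct.length = 3 then
    total + PySem.List.pyGetD ct 0 0 + PySem.List.pyGetD ct 1 0 + PySem.List.pyGetD ct 2 0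
  else if ct.length = 2 then
    total + PySem.List.pyGetD ct 1 0
  else
    total + PySem.List.pyGetD ct 0 0
termination_by ct.length
decreasing_by
  rw [PySem.List.slice_to_neg_ofNat ct 2 (by omega)]
  simp [List.length_take]; omega

def flashlight_problem (crossing_time : List Int) : Int :=
  pvLoopA ((PySem.List.sorted crossing_time (fun x => x))) 0

-- ===== PORT B =====
-- B's body on the sorted list: closed form, no loop over shrinking lists.
def pvAltBody (t : List Int) : Int :=
  let n := t.length
  if n ≤ 2 then PySem.List.pyGetD t (-1) 0
  else if n = 3 then t.getD 0 0 + t.getD 1 0 + t.getD 2 0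
  else
    let k := (n - 2) / 2
    let total := (k : Int) * (t.getD 0 0 + 2 * t.getD 1 0) +
      (List.range k).foldl (fun s i => s + t.getD (n - 1 - 2 * i) 0) 0
    if n % 2 = 0 then total + t.getD 1 0
    else total + t.getD 0 0 + t.getD 1 0 + t.getD 2 0

def flashlight_problem_alt (crossing_time : List Int) : Int :=
  pvAltBody ((PySem.List.sorted crossing_time (fun x => x)))

-- ===== PRECONDITION & SPEC =====
-- Pre_ excludes only the empty list, on which Python A raises IndexError (crossing_time[0]).
def Pre_flashlight_problem (crossing_time : List Int) : Prop := crossing_time ≠ []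
instance (crossing_time : List Int) : Decidable (Pre_flashlight_problem crossing_time) := by
  unfold Pre_flashlight_problem; infer_instance

def pvWitness_flashlight_problem : List Int := [5, 1, 7, 2, 9]

def Spec_flashlight_problem (crossing_time : List Int) (out : Int) : Prop := out = flashlight_problem_alt crossing_time
instance (crossing_time : List Int) (out : Int) : Decidable (Spec_flashlight_problem crossing_time out) := by unfold Spec_flashlight_problem; infer_instance

-- ===== CLAIM (what is proved, stated in full; the proofs are below) =====
def Claim_equal_flashlight_problem : Prop := ∀ (crossing_time : List Int), Dom_flashlight_problem crossing_time → Pre_flashlight_problem crossing_time → Spec_flashlight_problem crossing_time (flashlight_problem crossing_time)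

-- ===== LEMMAS AND PROOFS =====

-- getD of a take is getD of the list for in-range indices
lemma getD_take_of_lt (t : List Int) (m j : Nat) (h : j < m) :
    (t.take m).getD j 0 = t.getD j 0 := by
  simp [List.getD, h]

-- the step of A's loop on B's closed form: one iteration peels off t[n-1] and one (t0 + 2 t1) block
lemma altBody_step (t : List Int) (h : 3 < t.length) :
    pvAltBody t =
      t.getD 1 0 * 2 + t.getD 0 0 + t.getD (t.length - 1) 0 +
      pvAltBody (t.take (t.length - 2)) := by
  rcases Nat.lt_or_ge t.length 6 with h6 | h6
  · -- t.length = 4 or 5 : destructure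
    interval_cases hn : t.length <;>
      (rcases t with _|⟨a,_|⟨b,_|⟨c,_|⟨d,_|⟨e,_|⟨f,t⟩⟩⟩⟩⟩⟩ <;>
        simp_all [pvAltBody, PySem.List.pyGetD, PySem.List.pyGet?, PySem.List.pyIdx?] <;>
        try ring)
  · -- generic case n ≥ 6
    have hm : (t.take (t.length - 2)).length = t.length - 2 := by
      simp only [List.length_take]; omega
    simp only [pvAltBody, hm]
    have e1 : ¬ (t.length ≤ 2) := by omega
    have e2 : ¬ (t.length = 3) := by omega
    have e3 : ¬ (t.length - 2 ≤ 2) := by omega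
    have e4 : ¬ (t.length - 2 = 3) := by omega
    rw [if_neg e1, if_neg e2, if_neg e3, if_neg e4]
    have hk : (t.length - 2) / 2 = (t.length - 2 - 2) / 2 + 1 := by omega
    rw [hk, List.range_succ_eq_map]
    rw [PySem.List.foldl_add, PySem.List.foldl_add]
    simp only [List.map_cons, List.map_map, List.sum_cons]
    have hmap : (List.range ((t.length - 2 - 2) / 2)).map
        ((fun i => t.getD (t.length - 1 - 2 * i) 0) ∘ (· + 1)) =
        (List.range ((t.length - 2 - 2) / 2)).map
        (fun i => (t.take (t.length - 2)).getD (t.length - 2 - 1 - 2 * i) 0) := by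
      apply List.map_congr_left
      intro i hi
      simp only [List.mem_range] at hi
      simp only [Function.comp]
      rw [getD_take_of_lt _ _ _ (by omega)]
      congr 1
      omega
    rw [hmap]
    rw [getD_take_of_lt _ _ _ (by omega), getD_take_of_lt _ _ _ (by omega),
        getD_take_of_lt _ _ _ (by omega)]
    simp only [Nat.mul_zero, Nat.sub_zero]
    push_cast [hk]
    rcases Nat.mod_two_eq_zero_or_one t.length with he | ho
    · rw [if_pos he, if_pos (show (t.length - 2) % 2 = 0 by omega)]
      ring
    · rw [if_neg (show ¬ t.length % 2 = 0 by omega),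
          if_neg (show ¬ (t.length - 2) % 2 = 0 by omega)]
      ring


-- the loop computes total + altBody, for every list
lemma loopA_eq (ct : List Int) (total : Int) :
    pvLoopA ct total = total + pvAltBody ct := by
  by_cases h : ct.length > 3
  · rw [pvLoopA, dif_pos h,
        PySem.List.slice_to_neg_ofNat ct 2 (by omega)]
    rw [loopA_eq (ct.take (ct.length - 2))]
    rw [altBody_step ct h]
    have g1 : PySem.List.pyGetD ct 1 0 = ct.getD 1 0 := by
      simp [pysem]
    have g0 : PySem.List.pyGetD ct 0 0 = ct.getD 0 0 := PySem.List.pyGetD_zero ct 0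
    have gl : PySem.List.pyGetD ct (-1) 0 = ct.getD (ct.length - 1) 0 := by
      rw [PySem.List.pyGetD_neg_ofNat ct 1 0 (by omega) (by omega)]
      simp [List.getD, List.getElem?_eq_getElem (by omega : ct.length - 1 < ct.length)]
    rw [g1, g0, gl]
    ring
  · rw [pvLoopA, dif_neg h]
    unfold pvAltBody
    rcases ct with _|⟨a,_|⟨b,_|⟨c,_|⟨d,t⟩⟩⟩⟩ <;>
      simp_all [PySem.List.pyGetD, PySem.List.pyGet?, PySem.List.pyIdx?] <;>
      try ring
termination_by ct.length
decreasing_by simp only [List.length_take]; omega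

-- ===== VERDICT (by name: the statement is the Claim_ definition above) =====
theorem flashlight_problem_spec : Claim_equal_flashlight_problem := by
  intro ct _ _
  unfold Spec_flashlight_problem flashlight_problem flashlight_problem_alt
  rw [loopA_eq]; ring
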